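-- pv_equiv track=rewrite | github.com/angeonseok/APS_angeonseok | 벅벅.py | can_runway
-- ===== SOURCE A (Python) =====
-- def can_runway(line, X):
--     N = len(line)
--     used = [False] * N  # 경사로가 이미 놓인 칸 표시(중복 설치 방지)
--
--     for i in range(N - 1):
--         if line[i] == line[i + 1]:
--             continue
--
--         diff = line[i + 1] - line[i]
--
--         # 1) 올라가는 경우: 뒤쪽으로 X칸이 모두 같은 높이여야 함
--         if diff == 1:
--             for j in range(i, i - X, -1):
--                 if j < 0 or used[j] or line[j] != line[i]:
--                     return False
--                 used[j] = True
--
--         # 2) 내려가는 경우: 앞쪽으로 X칸이 모두 다음 높이여야 함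
--         elif diff == -1:
--             for j in range(i + 1, i + 1 + X):
--                 if j >= N or used[j] or line[j] != line[i + 1]:
--                     return False
--                 used[j] = True
--
--         # 3) 높이차가 2 이상이면 불가능
--         else:
--             return False
--
--     return True
-- ===== SOURCE B (Python) =====
-- def can_runway(line, X):
--     # Single pass: instead of a per-cell `used` array with inner scanning
--     # loops, keep one integer `free` = the first index of the current flat run
--     # that is not reserved by an already-placed ramp. An up-step at i needs the
--     # X cells ending at i to be unreserved and inside the run (i + 1 - X >= free);
--     # a down-step at i reserves the X cells after i (free becomes i + 1 + X),
--     # after checking they exist and nothing before i + 1 is still pending.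
--     N = len(line)
--     free = 0
--     for i in range(N - 1):
--         d = line[i + 1] - line[i]
--         if d == 0:
--             continue
--         if d == 1:
--             if i + 1 - X < free:
--                 return False
--             free = i + 1
--         elif d == -1:
--             if i + 1 < free or i + 1 + X > N:
--                 return False
--             free = i + 1 + X
--         else:
--             return False
--     return True
-- ===== Notes on version B (the rewrite author's own statement) =====
-- stated objective: simpler
-- what changed: Replaced the per-cell used[] marking array and the two inner X-step scanning loops by a single left-to-right pass that keeps one integer 'free' (first cell of the current flat run not reserved by an already-placed ramp) and checks each height step against it arithmetically.
import Mathlib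
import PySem

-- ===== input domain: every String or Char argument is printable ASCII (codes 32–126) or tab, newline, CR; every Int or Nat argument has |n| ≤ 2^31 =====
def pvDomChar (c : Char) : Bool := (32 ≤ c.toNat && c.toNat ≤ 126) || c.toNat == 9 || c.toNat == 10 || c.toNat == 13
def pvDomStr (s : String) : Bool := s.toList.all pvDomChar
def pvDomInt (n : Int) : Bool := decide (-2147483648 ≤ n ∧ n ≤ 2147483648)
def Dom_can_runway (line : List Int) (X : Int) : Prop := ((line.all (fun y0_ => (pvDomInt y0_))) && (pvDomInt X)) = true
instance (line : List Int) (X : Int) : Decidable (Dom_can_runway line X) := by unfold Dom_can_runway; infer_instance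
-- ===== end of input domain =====

-- B replaces A's used[] array and inner X-step scans by one simpler pass keeping a single integer of state.

-- ===== PORT A =====
-- inner loop `for j in range(i, i-X, -1)` of the up branch; n = max(0,X) iterations,
-- none = `return False`.  line[j]/used[j] are read only after the j<0 guard, so getD is exact.
def pvUpLoop (line : List Int) (h : Int) (used : List Bool) (j : Int) : Nat → Option (List Bool)
  | 0 => some used
  | n+1 =>
    if j < 0 ∨ used.getD j.toNat false = true ∨ line.getD j.toNat 0 ≠ h then none
    else pvUpLoop line h (used.set j.toNat true) (j-1) n

-- inner loop `for j in range(i+1, i+1+X)` of the down branch; reads are guarded by j < N.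
def pvDownLoop (line : List Int) (h : Int) (used : List Bool) (j : Int) : Nat → Option (List Bool)
  | 0 => some used
  | n+1 =>
    if (line.length : Int) ≤ j ∨ used.getD j.toNat false = true ∨ line.getD j.toNat 0 ≠ h then none
    else pvDownLoop line h (used.set j.toNat true) (j+1) n

-- outer loop `for i in range(N-1)`, r = remaining iterations
def pvALoop (line : List Int) (X : Int) : List Bool → Nat → Nat → Bool
  | _, _, 0 => true
  | used, i, r+1 =>
    if line.getD i 0 = line.getD (i+1) 0 then pvALoop line X used (i+1) r
    else if line.getD (i+1) 0 - line.getD i 0 = 1 then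
      match pvUpLoop line (line.getD i 0) used (i : Int) X.toNat with
      | none => false
      | some u => pvALoop line X u (i+1) r
    else if line.getD (i+1) 0 - line.getD i 0 = -1 then
      match pvDownLoop line (line.getD (i+1) 0) used ((i : Int)+1) X.toNat with
      | none => false
      | some u => pvALoop line X u (i+1) r
    else false

def can_runway (line : List Int) (X : Int) : Bool :=
  pvALoop line X (List.replicate line.length false) 0 (line.length - 1)

-- ===== PORT B =====
-- B: single pass with integer state `free` (first unreserved cell of the current run)
def pvBLoop (line : List Int) (X : Int) : Int → Nat → Nat → Bool
  | _, _, 0 => true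
  | free, i, r+1 =>
    let d := line.getD (i+1) 0 - line.getD i 0
    if d = 0 then pvBLoop line X free (i+1) r
    else if d = 1 then
      if (i : Int) + 1 - X < free then false
      else pvBLoop line X ((i : Int) + 1) (i+1) r
    else if d = -1 then
      if (i : Int) + 1 < free ∨ (line.length : Int) < (i : Int) + 1 + X then false
      else pvBLoop line X ((i : Int) + 1 + X) (i+1) r
    else false

def can_runway_alt (line : List Int) (X : Int) : Bool :=
  pvBLoop line X 0 0 (line.length - 1)

-- ===== PRECONDITION & SPEC =====
def Spec_can_runway (line : List Int) (X : Int) (out : Bool) : Prop := out = can_runway_alt line X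
instance (line : List Int) (X : Int) (out : Bool) : Decidable (Spec_can_runway line X out) := by unfold Spec_can_runway; infer_instance

-- ===== CLAIM (what is proved, stated in full; the proofs are below) =====
def Claim_equal_can_runway : Prop := ∀ (line : List Int) (X : Int), Dom_can_runway line X → Spec_can_runway line X (can_runway line X)

-- ===== LEMMAS AND PROOFS =====

-- small getD helpers used throughout
lemma pvGetD_set_ne (l : List Bool) (n m : Nat) (h : n ≠ m) (a : Bool) :
    (l.set n a).getD m false = l.getD m false := by
  simp [List.getD, List.getElem?_set_ne h]

lemma pvGetD_set_self (l : List Bool) (n : Nat) (h : n < l.length) (a : Bool) :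
    (l.set n a).getD n false = a := by
  simp [List.getD, h]

lemma pvGetD_replicate (n m : Nat) : (List.replicate n false).getD m false = false := by
  simp [List.getD, List.getElem?_replicate]; split <;> rfl

lemma pvBoolFalse {b : Bool} {p : Prop} (h : b = true ↔ p) (hp : ¬p) : b = false := by
  cases b
  · rfl
  · exact absurd (h.mp rfl) hp

-- loop invariant relating A's used[] array to B's single integer `free` at boundary i
def pvInv (line : List Int) (used : List Bool) (free : Int) (i : Nat) : Prop :=
  used.length = line.length ∧ 0 ≤ free ∧ free ≤ (line.length : Int) ∧
  (∀ j : Nat, i < j → j < line.length → (used.getD j false = true ↔ (j : Int) < free)) ∧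
  (∀ j : Nat, free ≤ (j : Int) → j ≤ i → line.getD j 0 = line.getD i 0) ∧
  (∀ j : Nat, free ≤ (j : Int) → j ≤ i → used.getD j false = false) ∧
  ((i : Int) + 1 < free → used.getD i false = true) ∧
  (1 ≤ free → used.getD (free - 1).toNat false = true)

lemma pvUpLoop_none_iff (line : List Int) (h : Int) :
    ∀ (n : Nat) (used : List Bool) (j : Int),
      (pvUpLoop line h used j n = none ↔
        ∃ m : Nat, m < n ∧ (j - m < 0 ∨ used.getD (j - m).toNat false = true ∨
          line.getD (j - m).toNat 0 ≠ h)) := by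
  intro n
  induction n with
  | zero => intro used j; simp [pvUpLoop]
  | succ n ih =>
    intro used j
    by_cases hb : j < 0 ∨ used.getD j.toNat false = true ∨ line.getD j.toNat 0 ≠ h
    · simp only [pvUpLoop, if_pos hb]
      constructor
      · intro _
        exact ⟨0, Nat.succ_pos n, by simpa using hb⟩
      · intro _; trivial
    · simp only [pvUpLoop, if_neg hb]
      rw [ih]
      push_neg at hb
      obtain ⟨hj0, hu0, hl0⟩ := hb
      constructor
      · rintro ⟨m, hm, hbad⟩
        refine ⟨m + 1, by omega, ?_⟩
        have hc : j - ((m + 1 : Nat) : Int) = j - 1 - (m : Int) := by push_cast; ring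
        rw [hc]
        by_cases hneg : j - 1 - (m : Int) < 0
        · exact Or.inl hneg
        · have hne : j.toNat ≠ (j - 1 - (m : Int)).toNat := by omega
          rwa [pvGetD_set_ne used _ _ hne true] at hbad
      · rintro ⟨m, hm, hbad⟩
        cases m with
        | zero =>
          exfalso
          simp only [Nat.cast_zero, sub_zero] at hbad
          rcases hbad with h1 | h2 | h3
          · omega
          · exact hu0 h2
          · exact h3 hl0
        | succ m =>
          refine ⟨m, by omega, ?_⟩
          have hc : j - ((m + 1 : Nat) : Int) = j - 1 - (m : Int) := by push_cast; ring
          rw [hc] at hbad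
          by_cases hneg : j - 1 - (m : Int) < 0
          · exact Or.inl hneg
          · have hne : j.toNat ≠ (j - 1 - (m : Int)).toNat := by omega
            rwa [pvGetD_set_ne used _ _ hne true]

lemma pvUpLoop_some (line : List Int) (h : Int) :
    ∀ (n : Nat) (used : List Bool) (j : Int), j < (used.length : Int) →
      (∀ m : Nat, m < n → ¬(j - m < 0 ∨ used.getD (j - m).toNat false = true ∨
          line.getD (j - m).toNat 0 ≠ h)) →
      ∃ u : List Bool, pvUpLoop line h used j n = some u ∧ u.length = used.length ∧
        (∀ k : Nat, k < used.length →
          (u.getD k false = true ↔ (used.getD k false = true ∨ (j - n < (k : Int) ∧ (k : Int) ≤ j)))) := by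
  intro n
  induction n with
  | zero =>
    intro used j _ _
    refine ⟨used, rfl, rfl, fun k _ => ?_⟩
    constructor
    · exact fun hk => Or.inl hk
    · rintro (hk | ⟨h1, h2⟩)
      · exact hk
      · exfalso; simp at h1; omega
  | succ n ih =>
    intro used j hjlen hgood
    have h0 := hgood 0 (Nat.succ_pos n)
    push_neg at h0
    obtain ⟨hj0, hu0, hl0⟩ := h0
    simp only [Nat.cast_zero, sub_zero] at hj0 hu0 hl0
    have hj0' : 0 ≤ j := by omega
    have hjlt : j.toNat < used.length := by omega
    have hcond : ¬(j < 0 ∨ used.getD j.toNat false = true ∨ line.getD j.toNat 0 ≠ h) := by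
      push_neg
      exact ⟨hj0, hu0, hl0⟩
    simp only [pvUpLoop]
    rw [if_neg hcond]
    have hgood' : ∀ m : Nat, m < n →
        ¬(j - 1 - m < 0 ∨ (used.set j.toNat true).getD (j - 1 - (m : Int)).toNat false = true ∨
          line.getD (j - 1 - (m : Int)).toNat 0 ≠ h) := by
      intro m hm
      have hh := hgood (m + 1) (by omega)
      push_neg at hh
      obtain ⟨ha1, ha2, ha3⟩ := hh
      have hc : j - ((m + 1 : Nat) : Int) = j - 1 - (m : Int) := by push_cast; ring
      rw [hc] at ha1 ha2 ha3
      have hne : j.toNat ≠ (j - 1 - (m : Int)).toNat := by omega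
      push_neg
      refine ⟨ha1, ?_, ha3⟩
      rw [pvGetD_set_ne used _ _ hne true]
      exact ha2
    have hlen' : (used.set j.toNat true).length = used.length := List.length_set ..
    obtain ⟨u, hu, hulen, huc⟩ := ih (used.set j.toNat true) (j - 1)
      (by rw [hlen']; omega) hgood'
    refine ⟨u, hu, by rw [hulen, hlen'], fun k hk => ?_⟩
    rw [huc k (by rw [hlen']; exact hk)]
    by_cases hkj : k = j.toNat
    · subst hkj
      rw [pvGetD_set_self used _ hjlt]
      constructor
      · intro _; exact Or.inr ⟨by push_cast; omega, by omega⟩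
      · intro _; exact Or.inl rfl
    · rw [pvGetD_set_ne used _ _ (fun he => hkj he.symm) true]
      have hwin : (j - 1 - (n : Int) < (k : Int) ∧ (k : Int) ≤ j - 1) ↔
          (j - ((n + 1 : Nat) : Int) < (k : Int) ∧ (k : Int) ≤ j) := by
        have hknej : (k : Int) ≠ j := by omega
        push_cast
        omega
      rw [hwin]

lemma pvDownLoop_none_iff (line : List Int) (h : Int) :
    ∀ (n : Nat) (used : List Bool) (j : Int), 0 ≤ j →
      (pvDownLoop line h used j n = none ↔
        ∃ m : Nat, m < n ∧ ((line.length : Int) ≤ j + m ∨ used.getD (j + m).toNat false = true ∨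
          line.getD (j + m).toNat 0 ≠ h)) := by
  intro n
  induction n with
  | zero => intro used j _; simp [pvDownLoop]
  | succ n ih =>
    intro used j hj0
    by_cases hb : (line.length : Int) ≤ j ∨ used.getD j.toNat false = true ∨ line.getD j.toNat 0 ≠ h
    · simp only [pvDownLoop, if_pos hb]
      constructor
      · intro _
        exact ⟨0, Nat.succ_pos n, by simpa using hb⟩
      · intro _; trivial
    · simp only [pvDownLoop, if_neg hb]
      rw [ih _ _ (by omega)]
      push_neg at hb
      obtain ⟨hjN, hu0, hl0⟩ := hb
      constructor
      · rintro ⟨m, hm, hbad⟩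
        refine ⟨m + 1, by omega, ?_⟩
        have hc : j + ((m + 1 : Nat) : Int) = j + 1 + (m : Int) := by push_cast; ring
        rw [hc]
        have hne : j.toNat ≠ (j + 1 + (m : Int)).toNat := by omega
        rwa [pvGetD_set_ne used _ _ hne true] at hbad
      · rintro ⟨m, hm, hbad⟩
        cases m with
        | zero =>
          exfalso
          simp only [Nat.cast_zero, add_zero] at hbad
          rcases hbad with h1 | h2 | h3
          · omega
          · exact hu0 h2
          · exact h3 hl0
        | succ m =>
          refine ⟨m, by omega, ?_⟩
          have hc : j + ((m + 1 : Nat) : Int) = j + 1 + (m : Int) := by push_cast; ring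
          rw [hc] at hbad
          have hne : j.toNat ≠ (j + 1 + (m : Int)).toNat := by omega
          rwa [pvGetD_set_ne used _ _ hne true]

lemma pvDownLoop_some (line : List Int) (h : Int) :
    ∀ (n : Nat) (used : List Bool) (j : Int), 0 ≤ j → used.length = line.length →
      (∀ m : Nat, m < n → ¬((line.length : Int) ≤ j + m ∨ used.getD (j + m).toNat false = true ∨
          line.getD (j + m).toNat 0 ≠ h)) →
      ∃ u : List Bool, pvDownLoop line h used j n = some u ∧ u.length = used.length ∧
        (∀ k : Nat, k < used.length →
          (u.getD k false = true ↔ (used.getD k false = true ∨ (j ≤ (k : Int) ∧ (k : Int) < j + n)))) := by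
  intro n
  induction n with
  | zero =>
    intro used j _ _ _
    refine ⟨used, rfl, rfl, fun k _ => ?_⟩
    constructor
    · exact fun hk => Or.inl hk
    · rintro (hk | ⟨h1, h2⟩)
      · exact hk
      · exfalso; simp at h2; omega
  | succ n ih =>
    intro used j hj0 hlen hgood
    have h0 := hgood 0 (Nat.succ_pos n)
    push_neg at h0
    obtain ⟨hjN, hu0, hl0⟩ := h0
    simp only [Nat.cast_zero, add_zero] at hjN hu0 hl0
    have hjlt : j.toNat < used.length := by omega
    have hcond : ¬((line.length : Int) ≤ j ∨ used.getD j.toNat false = true ∨ line.getD j.toNat 0 ≠ h) := by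
      push_neg
      exact ⟨hjN, hu0, hl0⟩
    simp only [pvDownLoop]
    rw [if_neg hcond]
    have hgood' : ∀ m : Nat, m < n →
        ¬((line.length : Int) ≤ j + 1 + m ∨ (used.set j.toNat true).getD (j + 1 + (m : Int)).toNat false = true ∨
          line.getD (j + 1 + (m : Int)).toNat 0 ≠ h) := by
      intro m hm
      have hh := hgood (m + 1) (by omega)
      push_neg at hh
      obtain ⟨ha1, ha2, ha3⟩ := hh
      have hc : j + ((m + 1 : Nat) : Int) = j + 1 + (m : Int) := by push_cast; ring
      rw [hc] at ha1 ha2 ha3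
      have hne : j.toNat ≠ (j + 1 + (m : Int)).toNat := by omega
      push_neg
      refine ⟨ha1, ?_, ha3⟩
      rw [pvGetD_set_ne used _ _ hne true]
      exact ha2
    have hlen' : (used.set j.toNat true).length = used.length := List.length_set ..
    obtain ⟨u, hu, hulen, huc⟩ := ih (used.set j.toNat true) (j + 1)
      (by omega) (by rw [hlen']; exact hlen) hgood'
    refine ⟨u, hu, by rw [hulen, hlen'], fun k hk => ?_⟩
    rw [huc k (by rw [hlen']; exact hk)]
    by_cases hkj : k = j.toNat
    · subst hkj
      rw [pvGetD_set_self used _ hjlt]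
      constructor
      · intro _; exact Or.inr ⟨by omega, by push_cast; omega⟩
      · intro _; exact Or.inl rfl
    · rw [pvGetD_set_ne used _ _ (fun he => hkj he.symm) true]
      have hwin : (j + 1 ≤ (k : Int) ∧ (k : Int) < j + 1 + (n : Int)) ↔
          (j ≤ (k : Int) ∧ (k : Int) < j + ((n + 1 : Nat) : Int)) := by
        have hknej : (k : Int) ≠ j := by omega
        push_cast
        omega
      rw [hwin]

-- once some boundary k ahead lies strictly inside the reserved zone, B must answer false
lemma pvBLoop_doom (line : List Int) (X : Int) (hX : 1 ≤ X) :
    ∀ (r i : Nat) (free : Int),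
      (∃ k : Nat, i ≤ k ∧ k < i + r ∧ (k : Int) + 1 < free ∧
        line.getD k 0 ≠ line.getD (k + 1) 0) →
      pvBLoop line X free i r = false := by
  intro r
  induction r with
  | zero =>
    rintro i free ⟨k, h1, h2, _, _⟩
    omega
  | succ r ih =>
    rintro i free ⟨k, hik, hkr, hkf, hkne⟩
    simp only [pvBLoop]
    by_cases hd0 : line.getD (i+1) 0 - line.getD i 0 = 0
    · rw [if_pos hd0]
      have hki : k ≠ i := by
        intro he; subst he; exact hkne (by omega)
      exact ih (i+1) free ⟨k, by omega, by omega, hkf, hkne⟩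
    · rw [if_neg hd0]
      have hfree : (i : Int) + 1 < free := by omega
      by_cases hd1 : line.getD (i+1) 0 - line.getD i 0 = 1
      · rw [if_pos hd1, if_pos (show (i : Int) + 1 - X < free by omega)]
      · rw [if_neg hd1]
        by_cases hdm : line.getD (i+1) 0 - line.getD i 0 = -1
        · rw [if_pos hdm, if_pos (Or.inl hfree)]
        · rw [if_neg hdm]

lemma pvMain_pos (line : List Int) (X : Int) (hX : 1 ≤ X) :
    ∀ (r i : Nat) (used : List Bool) (free : Int), i + r + 1 = line.length →
      pvInv line used free i →
      pvALoop line X used i r = pvBLoop line X free i r := by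
  intro r
  induction r with
  | zero => intro i used free _ _; rfl
  | succ r ih =>
    intro i used free hN hInv
    obtain ⟨hlen, hf0, hfN, hF, hH, hR, hP, hQ⟩ := hInv
    have hiN : i + 1 < line.length := by omega
    have hXt : (X.toNat : Int) = X := Int.toNat_of_nonneg (by omega)
    simp only [pvALoop, pvBLoop]
    by_cases hd0 : line.getD i 0 = line.getD (i+1) 0
    · -- flat step
      rw [if_pos hd0, if_pos (show line.getD (i+1) 0 - line.getD i 0 = 0 by omega)]
      refine ih (i+1) used free (by omega) ⟨hlen, hf0, hfN, ?_, ?_, ?_, ?_, hQ⟩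
      · intro j hj1 hj2
        exact hF j (by omega) hj2
      · intro j hj1 hj2
        rcases Nat.lt_or_ge j (i+1) with hlt | hge
        · rw [hH j hj1 (by omega)]; exact hd0
        · have hj : j = i + 1 := by omega
          subst hj; rfl
      · intro j hj1 hj2
        rcases Nat.lt_or_ge j (i+1) with hlt | hge
        · exact hR j hj1 (by omega)
        · have hj : j = i + 1 := by omega
          subst hj
          exact pvBoolFalse (hF (i+1) (by omega) hiN) (by omega)
      · intro hfi
        exact (hF (i+1) (by omega) hiN).mpr (by omega)
    · rw [if_neg hd0, if_neg (show ¬(line.getD (i+1) 0 - line.getD i 0 = 0) by omega)]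
      by_cases hd1 : line.getD (i+1) 0 - line.getD i 0 = 1
      · -- up step
        rw [if_pos hd1, if_pos hd1]
        by_cases hfail : (i : Int) + 1 - X < free
        · rw [if_pos hfail]
          have hnone : pvUpLoop line (line.getD i 0) used (i : Int) X.toNat = none := by
            rw [pvUpLoop_none_iff]
            rcases (show ((i:Int)+1 < free) ∨ (1 ≤ free ∧ free ≤ (i:Int)+1) ∨ free = 0 by omega)
              with hc | hc | hc
            · refine ⟨0, by omega, Or.inr (Or.inl ?_)⟩
              have he : ((i : Int) - ((0:Nat):Int)).toNat = i := by omega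
              rw [he]
              exact hP hc
            · refine ⟨((i:Int)+1-free).toNat, by omega, Or.inr (Or.inl ?_)⟩
              have he : ((i : Int) - ((((i:Int)+1-free).toNat : Nat) : Int)).toNat = (free-1).toNat := by omega
              rw [he]
              exact hQ hc.1
            · exact ⟨i+1, by omega, Or.inl (by omega)⟩
          rw [hnone]
        · rw [if_neg hfail]
          have hgood : ∀ m : Nat, m < X.toNat →
              ¬((i:Int) - m < 0 ∨ used.getD ((i:Int) - m).toNat false = true ∨
                line.getD ((i:Int) - m).toNat 0 ≠ line.getD i 0) := by
            intro m hm
            have hj1 : free ≤ ((((i:Int) - m).toNat : Nat) : Int) := by omega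
            have hj2 : ((i:Int) - m).toNat ≤ i := by omega
            push_neg
            refine ⟨by omega, ?_, hH _ hj1 hj2⟩
            rw [hR _ hj1 hj2]
            simp
          obtain ⟨u, hu, hulen, huc⟩ :=
            pvUpLoop_some line (line.getD i 0) X.toNat used (i : Int) (by omega) hgood
          rw [hu]
          refine ih (i+1) u ((i:Int)+1) (by omega) ⟨by omega, by omega, by omega, ?_, ?_, ?_, ?_, ?_⟩
          · intro j hj1 hj2
            rw [huc j (by omega)]
            constructor
            · rintro (hju | ⟨hw1, hw2⟩)
              · have := (hF j (by omega) hj2).mp hju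
                omega
              · omega
            · intro hjf; exfalso; omega
          · intro j hj1 hj2
            have hj : j = i + 1 := by omega
            subst hj; rfl
          · intro j hj1 hj2
            have hj : j = i + 1 := by omega
            subst hj
            refine pvBoolFalse (huc (i+1) (by omega)) ?_
            rintro (hju | ⟨hw1, hw2⟩)
            · have := (hF (i+1) (by omega) hiN).mp hju
              omega
            · omega
          · intro hcon; exfalso; omega
          · intro _
            have he : ((i:Int) + 1 - 1).toNat = i := by omega
            rw [he]
            exact (huc i (by omega)).mpr (Or.inr ⟨by omega, by omega⟩)
      · rw [if_neg hd1, if_neg hd1]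
        by_cases hdm : line.getD (i+1) 0 - line.getD i 0 = -1
        · -- down step
          rw [if_pos hdm, if_pos hdm]
          by_cases hfail : (i:Int) + 1 < free ∨ (line.length : Int) < (i:Int) + 1 + X
          · rw [if_pos hfail]
            have hnone : pvDownLoop line (line.getD (i+1) 0) used ((i:Int)+1) X.toNat = none := by
              rw [pvDownLoop_none_iff _ _ _ _ _ (by omega)]
              rcases hfail with hc | hc
              · refine ⟨0, by omega, Or.inr (Or.inl ?_)⟩
                have he : ((i:Int) + 1 + ((0:Nat):Int)).toNat = i + 1 := by omega
                rw [he]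
                exact (hF (i+1) (by omega) hiN).mpr (by omega)
              · exact ⟨line.length - (i+1), by omega, Or.inl (by omega)⟩
            rw [hnone]
          · rw [if_neg hfail]
            push_neg at hfail
            obtain ⟨hfr, hbd⟩ := hfail
            by_cases hrun : ∀ m : Nat, m < X.toNat → line.getD (i+1+m) 0 = line.getD (i+1) 0
            · have hgood : ∀ m : Nat, m < X.toNat →
                  ¬((line.length:Int) ≤ (i:Int)+1+m ∨ used.getD ((i:Int)+1+m).toNat false = true ∨
                    line.getD ((i:Int)+1+m).toNat 0 ≠ line.getD (i+1) 0) := by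
                intro m hm
                have ht : ((i:Int)+1+(m:Int)).toNat = i+1+m := by omega
                push_neg
                refine ⟨by omega, ?_, ?_⟩
                · rw [ht, pvBoolFalse (hF (i+1+m) (by omega) (by omega)) (by omega)]
                  simp
                · rw [ht]
                  exact hrun m hm
              obtain ⟨u, hu, hulen, huc⟩ :=
                pvDownLoop_some line (line.getD (i+1) 0) X.toNat used ((i:Int)+1) (by omega) hlen hgood
              rw [hu]
              refine ih (i+1) u ((i:Int)+1+X) (by omega)
                ⟨by omega, by omega, by omega, ?_, ?_, ?_, ?_, ?_⟩
              · intro j hj1 hj2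
                rw [huc j (by omega)]
                constructor
                · rintro (hju | ⟨hw1, hw2⟩)
                  · have := (hF j (by omega) hj2).mp hju
                    omega
                  · omega
                · intro hjf
                  exact Or.inr ⟨by omega, by omega⟩
              · intro j hj1 hj2; exfalso; omega
              · intro j hj1 hj2; exfalso; omega
              · intro _
                exact (huc (i+1) (by omega)).mpr (Or.inr ⟨by omega, by omega⟩)
              · intro _
                have he : ((i:Int)+1+X-1).toNat = i + X.toNat := by omega
                rw [he]
                exact (huc (i + X.toNat) (by omega)).mpr (Or.inr ⟨by omega, by omega⟩)
            · -- A fails inside the forward scan; B answers false at the next height change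
              push_neg at hrun
              have hm1 := Nat.find_spec hrun
              set m1 := Nat.find hrun with hm1def
              have hm1X : m1 < X.toNat := hm1.1
              have hm1ne : line.getD (i+1+m1) 0 ≠ line.getD (i+1) 0 := hm1.2
              have hm1pos : 1 ≤ m1 := by
                rcases Nat.eq_zero_or_pos m1 with h0 | h0
                · exfalso; rw [h0] at hm1ne; exact hm1ne rfl
                · exact h0
              have hm1min : line.getD (i+1+(m1-1)) 0 = line.getD (i+1) 0 := by
                have := Nat.find_min hrun (m := m1 - 1) (by omega)
                by_contra hne
                exact this ⟨by omega, hne⟩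
              have hnone : pvDownLoop line (line.getD (i+1) 0) used ((i:Int)+1) X.toNat = none := by
                rw [pvDownLoop_none_iff _ _ _ _ _ (by omega)]
                refine ⟨m1, hm1X, Or.inr (Or.inr ?_)⟩
                have ht : ((i:Int)+1+(m1:Int)).toNat = i+1+m1 := by omega
                rw [ht]
                exact hm1ne
              rw [hnone]
              symm
              apply pvBLoop_doom line X hX
              refine ⟨i + m1, by omega, by omega, by omega, ?_⟩
              have he : i + m1 + 1 = i + 1 + m1 := by omega
              have he2 : i + m1 = i + 1 + (m1 - 1) := by omega
              rw [he, he2, hm1min]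
              exact fun hcontra => hm1ne hcontra.symm
        · rw [if_neg hdm, if_neg hdm]

lemma pvMain_nonpos (line : List Int) (X : Int) (hX : X ≤ 0) :
    ∀ (r i : Nat) (used : List Bool) (free : Int), i + r + 1 = line.length →
      free ≤ (i : Int) + 1 →
      pvALoop line X used i r = pvBLoop line X free i r := by
  intro r
  induction r with
  | zero => intro i used free _ _; rfl
  | succ r ih =>
    intro i used free hN hfree
    have hXt : X.toNat = 0 := by omega
    simp only [pvALoop, pvBLoop, hXt]
    by_cases hd0 : line.getD i 0 = line.getD (i+1) 0
    · rw [if_pos hd0, if_pos (show line.getD (i+1) 0 - line.getD i 0 = 0 by omega)]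
      exact ih (i+1) used free (by omega) (by omega)
    · rw [if_neg hd0, if_neg (show ¬(line.getD (i+1) 0 - line.getD i 0 = 0) by omega)]
      by_cases hd1 : line.getD (i+1) 0 - line.getD i 0 = 1
      · rw [if_pos hd1, if_pos hd1, if_neg (show ¬((i:Int)+1-X < free) by omega)]
        exact ih (i+1) used ((i:Int)+1) (by omega) (by omega)
      · rw [if_neg hd1, if_neg hd1]
        by_cases hdm : line.getD (i+1) 0 - line.getD i 0 = -1
        · rw [if_pos hdm, if_pos hdm,
            if_neg (show ¬((i:Int)+1 < free ∨ (line.length:Int) < (i:Int)+1+X) by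
              push_neg
              constructor
              · omega
              · omega)]
          exact ih (i+1) used ((i:Int)+1+X) (by omega) (by omega)
        · rw [if_neg hdm, if_neg hdm]

-- ===== VERDICT (by name: the statement is the Claim_ definition above) =====
theorem can_runway_spec : Claim_equal_can_runway := by
  unfold Claim_equal_can_runway Spec_can_runway
  intro line X _
  show can_runway line X = can_runway_alt line X
  unfold can_runway can_runway_alt
  rcases Nat.eq_zero_or_pos line.length with h0 | hpos
  · have hr : line.length - 1 = 0 := by omega
    rw [hr]
    rfl
  · by_cases hX : 1 ≤ X
    · refine pvMain_pos line X hX (line.length - 1) 0 (List.replicate line.length false) 0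
        (by omega) ⟨List.length_replicate .., le_refl 0, by omega, ?_, ?_, ?_, ?_, ?_⟩
      · intro j _ _
        rw [pvGetD_replicate]
        constructor
        · intro h; exact absurd h (by simp)
        · intro h; exfalso; omega
      · intro j h1 h2
        have hj : j = 0 := by omega
        subst hj; rfl
      · intro j _ _
        exact pvGetD_replicate ..
      · intro h; exfalso; omega
      · intro h; exfalso; omega
    · exact pvMain_nonpos line X (by omega) (line.length - 1) 0
        (List.replicate line.length false) 0 (by omega) (by omega)
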